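-- pv_equiv track=rewrite | github.com/ImoutoHeaven/123FastLink-Pyfork | fastlink_transfer/importer.py | normalize_relative_path
-- ===== SOURCE A (Python) =====
-- def normalize_relative_path(value: str) -> str:
--     normalized = value.replace("\\", "/")
--     if not normalized or normalized.startswith("/") or normalized.endswith("/"):
--         raise ValueError("invalid path")
--     if "//" in normalized:
--         raise ValueError("invalid path")
--
--     parts = normalized.split("/")
--     if any(part in {"", ".", ".."} for part in parts):
--         raise ValueError("invalid path")
--
--     return normalized
-- ===== SOURCE B (Python) =====
-- def normalize_relative_path(value: str) -> str:
--     normalized = value.replace("\\", "/")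
--     length = 0
--     dots = True
--     for ch in normalized + "/":
--         if ch == "/":
--             if length == 0 or (dots and length <= 2):
--                 raise ValueError("invalid path")
--             length = 0
--             dots = True
--         else:
--             length += 1
--             dots = dots and ch == "."
--     return normalized
-- ===== Notes on version B (the rewrite author's own statement) =====
-- stated objective: alternative
-- what changed: B validates the backslash-normalized string in a single left-to-right pass with a per-segment state machine (segment length + all-dots flag), replacing A's separate prefix/suffix/double-slash substring scans and the split-then-check pass.
import Mathlib
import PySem

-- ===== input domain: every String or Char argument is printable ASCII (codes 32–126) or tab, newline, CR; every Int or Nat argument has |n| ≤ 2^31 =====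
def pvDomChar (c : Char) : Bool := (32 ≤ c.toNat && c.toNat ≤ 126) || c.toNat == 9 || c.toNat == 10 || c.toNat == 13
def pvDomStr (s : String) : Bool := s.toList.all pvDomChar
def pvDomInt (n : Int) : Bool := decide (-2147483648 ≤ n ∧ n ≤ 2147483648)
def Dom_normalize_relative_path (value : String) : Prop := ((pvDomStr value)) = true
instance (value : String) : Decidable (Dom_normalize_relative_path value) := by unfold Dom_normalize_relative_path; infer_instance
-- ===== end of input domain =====

-- B replaces A's chain of startswith/endswith/'//'/split scans by a single one-pass
-- segment state machine over the normalized string (objective: alternative, same cost).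


-- ===== PORT A =====
-- Python's `raise ValueError` branches return "" here; Pre_ excludes exactly those inputs.
def normalize_relative_path (value : String) : String :=
  let normalized := PySem.Str.replace value "\\" "/"
  if normalized == "" || PySem.Str.startswith normalized "/" || PySem.Str.endswith normalized "/" then
    ""
  else if PySem.Str.isIn "//" normalized then
    ""
  else
    let parts := (PySem.Str.split? normalized "/").getD []  -- sep "/" ≠ "", so split? is `some`
    if parts.any (fun p => p == "" || p == "." || p == "..") then ""
    else normalized

-- ===== PORT B =====
-- state = (length of current segment, current segment is all dots, a raise happened)
def pvAltStep (st : Nat × Bool × Bool) (ch : Char) : Nat × Bool × Bool :=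
  if ch == '/' then
    (0, true, st.2.2 || (st.1 == 0 || (st.2.1 && decide (st.1 ≤ 2))))
  else
    (st.1 + 1, st.2.1 && (ch == '.'), st.2.2)

def normalize_relative_path_alt (value : String) : String :=
  let normalized := PySem.Str.replace value "\\" "/"
  let st := (normalized.toList ++ ['/']).foldl pvAltStep (0, true, false)
  if st.2.2 then "" else normalized

-- ===== PRECONDITION & SPEC =====
-- Pre_ excludes exactly the inputs on which A raises ValueError.
def Pre_normalize_relative_path (value : String) : Prop :=
  let normalized := PySem.Str.replace value "\\" "/"
  ¬(normalized = "" ∨ PySem.Str.startswith normalized "/" = true ∨ PySem.Str.endswith normalized "/" = true) ∧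
  PySem.Str.isIn "//" normalized = false ∧
  ∀ p ∈ (PySem.Str.split? normalized "/").getD [], ¬(p = "" ∨ p = "." ∨ p = "..")

instance (value : String) : Decidable (Pre_normalize_relative_path value) := by
  unfold Pre_normalize_relative_path; infer_instance

def pvWitness_normalize_relative_path : String := "a\\b.txt"

def Spec_normalize_relative_path (value : String) (out : String) : Prop :=
  out = normalize_relative_path_alt value
instance (value : String) (out : String) : Decidable (Spec_normalize_relative_path value out) := by
  unfold Spec_normalize_relative_path; infer_instance

-- ===== CLAIM (what is proved, stated in full; the proofs are below) =====
def Claim_equal_normalize_relative_path : Prop :=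
  ∀ (value : String), Dom_normalize_relative_path value → Pre_normalize_relative_path value →
    Spec_normalize_relative_path value (normalize_relative_path value)

-- ===== LEMMAS AND PROOFS =====

-- reference segmentation of a char list on '/'
def pvConsHead (c : Char) : List (List Char) → List (List Char)
  | s :: ss => (c :: s) :: ss
  | [] => [[c]]

def pvSegs : List Char → List (List Char)
  | [] => [[]]
  | c :: rest => if c = '/' then [] :: pvSegs rest else pvConsHead c (pvSegs rest)

def pvPre (p : List Char) : List (List Char) → List (List Char)
  | s :: ss => (p ++ s) :: ss
  | [] => [p]

def pvBad (s : List Char) : Bool :=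
  s.length == 0 || (s.all (· == '.') && decide (s.length ≤ 2))

def pvBadExt (n : Nat) (d : Bool) (s : List Char) : Bool :=
  n + s.length == 0 || ((d && s.all (· == '.')) && decide (n + s.length ≤ 2))

lemma pvSegs_ne_nil (cs : List Char) : pvSegs cs ≠ [] := by
  induction cs with
  | nil => simp [pvSegs]
  | cons c rest ih =>
    simp only [pvSegs]
    split
    · simp
    · cases h : pvSegs rest with
      | nil => exact absurd h ih
      | cons s ss => simp [pvConsHead]

lemma pvGo_eq : ∀ (fuel : Nat) (l : List Char), l.length ≤ fuel → ∀ (cur : List Char) (acc : List (List Char)),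
    PySem.Chars.splitOn.go ['/'] fuel l cur acc = acc.reverse ++ pvPre cur.reverse (pvSegs l) := by
  intro fuel
  induction fuel with
  | zero =>
    intro l hl cur acc
    have : l = [] := by cases l <;> simp_all
    subst this
    simp [PySem.Chars.splitOn.go, pvSegs, pvPre]
  | succ f ih =>
    intro l hl cur acc
    cases l with
    | nil => simp [PySem.Chars.splitOn.go, pvSegs, pvPre]
    | cons c rest =>
      by_cases hc : c = '/'
      · subst hc
        have hpre : List.isPrefixOf ['/'] ('/' :: rest) = true := by simp [List.isPrefixOf]
        rw [PySem.Chars.splitOn.go]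
        simp only [hpre, if_true]
        rw [ih _ (by simpa using Nat.le_of_succ_le_succ hl)]
        simp only [pvSegs, if_true]
        cases h : pvSegs rest with
        | nil => exact absurd h (pvSegs_ne_nil rest)
        | cons s ss => simp [pvPre, h]
      · have hpre : List.isPrefixOf ['/'] (c :: rest) = false := by
          simp [List.isPrefixOf]; exact fun h => absurd h.symm hc
        rw [PySem.Chars.splitOn.go, if_neg (by simp [hpre]),
          ih _ (by simpa using Nat.le_of_succ_le_succ hl)]
        simp only [pvSegs, if_neg hc]
        cases h : pvSegs rest with
        | nil => exact absurd h (pvSegs_ne_nil rest)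
        | cons s ss => simp [pvPre, pvConsHead]

lemma pvSplitOn_eq (cs : List Char) : PySem.Chars.splitOn cs ['/'] = pvSegs cs := by
  rw [PySem.Chars.splitOn, pvGo_eq (cs.length + 1) cs (Nat.le_succ _) [] []]
  cases h : pvSegs cs with
  | nil => exact absurd h (pvSegs_ne_nil cs)
  | cons s ss => simp [pvPre, h]

lemma pvFoldB : ∀ (cs : List Char) (n : Nat) (d b : Bool),
    ((cs ++ ['/']).foldl pvAltStep (n, d, b)).2.2 =
      (b || pvBadExt n d (pvSegs cs).headI || ((pvSegs cs).tail.any pvBad)) := by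
  intro cs
  induction cs with
  | nil =>
    intro n d b
    simp [pvAltStep, pvSegs, pvBadExt]
  | cons c rest ih =>
    intro n d b
    by_cases hc : c = '/'
    · subst hc
      have hstep : pvAltStep (n, d, b) '/' = (0, true, b || (n == 0 || (d && decide (n ≤ 2)))) := by
        simp [pvAltStep]
      simp only [List.cons_append, List.foldl_cons, hstep, ih]
      simp only [pvSegs, if_true]
      cases h : pvSegs rest with
      | nil => exact absurd h (pvSegs_ne_nil rest)
      | cons s ss =>
        simp [pvBadExt, pvBad, Bool.or_assoc]
    · have hc' : (c == '/') = false := by simp [hc]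
      have hstep : pvAltStep (n, d, b) c = (n + 1, d && (c == '.'), b) := by
        simp [pvAltStep, hc']
      simp only [List.cons_append, List.foldl_cons, hstep, ih]
      simp only [pvSegs, if_neg hc]
      cases h : pvSegs rest with
      | nil => exact absurd h (pvSegs_ne_nil rest)
      | cons s ss =>
        simp only [pvConsHead, List.headI, List.tail]
        have harith : n + 1 + s.length = n + (s.length + 1) := by omega
        simp only [pvBadExt, Bool.and_assoc, harith, List.all_cons, List.length_cons]
        rfl

lemma pvBad_eq_false (s : List Char) (h0 : s ≠ []) (h1 : s ≠ ['.']) (h2 : s ≠ ['.', '.']) :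
    pvBad s = false := by
  match s with
  | [] => exact absurd rfl h0
  | [a] =>
    by_cases ha : a = '.'
    · subst ha; exact absurd rfl h1
    · simp [pvBad, ha]
  | [a, b] =>
    by_cases ha : a = '.' <;> by_cases hb : b = '.'
    · subst ha; subst hb; exact absurd rfl h2
    all_goals simp [pvBad, ha, hb]
  | a :: b :: c :: t =>
    simp [pvBad, show ¬ (a :: b :: c :: t).length ≤ 2 by simp]

-- ===== VERDICT (by name: the statement is the Claim_ definition above) =====
theorem normalize_relative_path_spec : Claim_equal_normalize_relative_path := by
  intro value _ hpre
  obtain ⟨h1, h2, h3⟩ := hpre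
  unfold Spec_normalize_relative_path normalize_relative_path normalize_relative_path_alt
  set N := PySem.Str.replace value "\\" "/" with hN
  push_neg at h1
  obtain ⟨hne, hsw, hew⟩ := h1
  -- the parts of A are exactly pvSegs N.toList (as strings)
  have hsplit : PySem.Str.split? N "/" = some ((pvSegs N.toList).map String.ofList) := by
    have hmap := PySem.Str.split?_map N "/"
    have hch : PySem.Chars.split? N.toList "/".toList = some (pvSegs N.toList) := by
      have h1 : ("/" : String).toList = ['/'] := rfl
      rw [h1]
      show some (PySem.Chars.splitOn N.toList ['/']) = _
      exact congrArg some (pvSplitOn_eq _)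
    rw [hch] at hmap
    cases hs : PySem.Str.split? N "/" with
    | none => rw [hs] at hmap; simp at hmap
    | some ps =>
      rw [hs] at hmap
      have hmap' : List.map (fun x => String.toList x) ps = pvSegs N.toList := by
        simpa using hmap
      congr 1
      have : ps.map (fun p => String.ofList p.toList) = (pvSegs N.toList).map String.ofList := by
        rw [← hmap', List.map_map]
        rfl
      simpa using this
  -- each segment is good
  have hgood : ∀ s ∈ pvSegs N.toList, pvBad s = false := by
    intro s hs
    have hmem : String.ofList s ∈ (PySem.Str.split? N "/").getD [] := by
      rw [hsplit]; simpa using ⟨s, hs, rfl⟩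
    have := h3 _ hmem
    push_neg at this
    obtain ⟨e0, e1, e2⟩ := this
    apply pvBad_eq_false
    · intro h; subst h; exact e0 (by rfl)
    · intro h; subst h; exact e1 (by rfl)
    · intro h; subst h; exact e2 (by rfl)
  -- B side: the fold never flags a raise
  have hBok : ((N.toList ++ ['/']).foldl pvAltStep (0, true, false)).2.2 = false := by
    rw [pvFoldB]
    cases h : pvSegs N.toList with
    | nil => exact absurd h (pvSegs_ne_nil _)
    | cons s ss =>
      have hhead : pvBadExt 0 true s = pvBad s := by simp [pvBadExt, pvBad]
      have hs0 : pvBad s = false := hgood s (by rw [h]; simp)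
      have hss : ss.any pvBad = false := by
        simp only [List.any_eq_false]
        intro t ht
        have := hgood t (by rw [h]; simp [ht])
        simp [this]
      simp [hhead, hs0, hss]
  -- A side: all checks pass
  have hA1 : (N == "" || PySem.Str.startswith N "/" || PySem.Str.endswith N "/") = false := by
    simp only [Bool.or_eq_false_iff]
    exact ⟨⟨beq_eq_false_iff_ne.mpr hne, Bool.eq_false_iff.mpr hsw⟩, Bool.eq_false_iff.mpr hew⟩
  have hA3 : (((PySem.Str.split? N "/").getD []).any (fun p => p == "" || p == "." || p == "..")) = false := by
    simp only [List.any_eq_false]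
    intro p hp
    have := h3 p hp
    push_neg at this
    simp [this.1, this.2.1, this.2.2]
  simp only [hA1, Bool.false_eq_true, if_false, h2, hA3, hBok]
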